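-- pv_equiv track=rewrite | github.com/thehalleyyoung/deppy | tests/test_examples/023_persistent_segment_tree.py | SPEC
-- ===== SOURCE A (Python) =====
-- def SPEC(initial_array, operations, result):
--     """Verify via naive simulation with per-version arrays."""
--     n = len(initial_array)
--     versions = [list(initial_array)]  # version 0
--
--     idx = 0
--     for op in operations:
--         if idx >= len(result):
--             return False
--         if op[0] == "update":
--             _, version, pos, val = op
--             if version >= len(versions):
--                 return False
--             new_arr = list(versions[version])
--             new_arr[pos] = val
--             versions.append(new_arr)
--             tag, vid = result[idx]
--             if tag != "new_version":
--                 return False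
--         elif op[0] == "query":
--             _, version, l, r = op
--             if version >= len(versions):
--                 return False
--             expected = sum(versions[version][l : r + 1])
--             tag, ans = result[idx]
--             if tag != "answer" or ans != expected:
--                 return False
--         idx += 1
--
--     return True
-- ===== SOURCE B (Python) =====
-- def SPEC(initial_array, operations, result):
--     """Verify using a journal of single-element patches: each update records
--     (parent_version, pos, val) in O(1); a query rebuilds the queried version
--     by replaying its patch chain onto the initial array."""
--     patches = [None]  # patches[v] for v >= 1 is (parent, pos, val); version 0 is the initial array
--
--     def materialize(version):
--         chain = []
--         while version:
--             parent, pos, val = patches[version]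
--             chain.append((pos, val))
--             version = parent
--         arr = list(initial_array)
--         for pos, val in reversed(chain):
--             arr[pos] = val
--         return arr
--
--     for idx, op in enumerate(operations):
--         if idx >= len(result):
--             return False
--         if op[0] == "update":
--             _, version, pos, val = op
--             if version >= len(patches):
--                 return False
--             tag, _ = result[idx]
--             if tag != "new_version":
--                 return False
--             patches.append((version, pos, val))
--         elif op[0] == "query":
--             _, version, l, r = op
--             if version >= len(patches):
--                 return False
--             arr = materialize(version)
--             expected = sum(arr[l : r + 1])
--             tag, ans = result[idx]
--             if tag != "answer" or ans != expected:
--                 return False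
--
--     return True
-- ===== Notes on version B (the rewrite author's own statement) =====
-- stated objective: alternative
-- what changed: A stores a full copy of the array for every version (O(n) per update); B keeps a journal of O(1) patch records (parent_version, pos, val) and rebuilds a version only when it is queried, by replaying its patch chain onto the initial array. Pre_ excludes inputs where A raises IndexError (update position outside [-n,n), version index below -len) and inputs that address a version by a negative index, where A's resolution via Python's accidental negative-index wraparound is not a behaviour a version-journal implementation reproduces (B treats version ids as names and raises or diverges there); …
-- outside the precondition, e.g. on SPEC([1, 2], [('query', -1, 0, 1)], [('answer', 3)]): A returns True, B raises TypeError
import Mathlib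
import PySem

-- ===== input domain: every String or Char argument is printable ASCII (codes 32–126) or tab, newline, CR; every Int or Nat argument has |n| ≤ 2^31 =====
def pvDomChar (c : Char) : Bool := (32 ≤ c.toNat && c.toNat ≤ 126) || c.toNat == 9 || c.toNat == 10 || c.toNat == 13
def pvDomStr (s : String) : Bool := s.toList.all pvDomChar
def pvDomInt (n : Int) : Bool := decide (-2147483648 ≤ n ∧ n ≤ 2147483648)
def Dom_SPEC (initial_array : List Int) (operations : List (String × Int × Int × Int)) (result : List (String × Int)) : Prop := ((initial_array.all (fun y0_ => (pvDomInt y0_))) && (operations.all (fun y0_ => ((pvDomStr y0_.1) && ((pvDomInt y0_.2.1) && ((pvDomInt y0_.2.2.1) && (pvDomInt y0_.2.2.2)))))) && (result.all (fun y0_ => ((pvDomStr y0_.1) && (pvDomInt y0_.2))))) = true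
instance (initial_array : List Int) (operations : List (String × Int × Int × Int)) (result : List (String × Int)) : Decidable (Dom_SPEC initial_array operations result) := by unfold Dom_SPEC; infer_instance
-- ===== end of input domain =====

-- B replaces A's per-version full-array copies by an O(1)-per-update journal of
-- (parent_version, pos, val) patches, rebuilding a version only when queried;
-- return values proved equal on Pre_.


-- ===== PORT A =====
-- A's for-loop over `operations` with early returns; state = (versions, idx)

def specLoopA (result : List (String × Int)) : List (String × Int × Int × Int) → List (List Int) → Int → Bool
  | [], _, _ => true
  | op :: ops, versions, idx =>
    if idx ≥ (result.length : Int) then false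
    else if op.1 = "update" then
      if op.2.1 ≥ (versions.length : Int) then false
      else
        match PySem.List.pyGet? versions op.2.1 with
        | none => false
        | some arr =>
          match PySem.List.pySet? arr op.2.2.1 op.2.2.2 with
          | none => false
          | some new_arr =>
            match PySem.List.pyGet? result idx with
            | none => false
            | some tv =>
              if tv.1 ≠ "new_version" then false
              else specLoopA result ops (versions ++ [new_arr]) (idx + 1)
    else if op.1 = "query" then
      if op.2.1 ≥ (versions.length : Int) then false
      else
        match PySem.List.pyGet? versions op.2.1 with
        | none => false
        | some arr =>
          let expected := (PySem.List.slice arr (some op.2.2.1) (some (op.2.2.2 + 1))).sum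
          match PySem.List.pyGet? result idx with
          | none => false
          | some ta =>
            if ta.1 ≠ "answer" ∨ ta.2 ≠ expected then false
            else specLoopA result ops versions (idx + 1)
    else specLoopA result ops versions (idx + 1)

def SPEC (initial_array : List Int) (operations : List (String × Int × Int × Int)) (result : List (String × Int)) : Bool :=
  specLoopA result operations [initial_array] 0

-- ===== PORT B =====
-- B's journal: patches[v] = (parent, pos, val) for v ≥ 1, slot 0 is the `None` placeholder.
-- `while version:` is ported with fuel = len(patches) (exact under Pre_: each stored parent
-- index is smaller than its own index, so a chain is shorter than the journal);
-- `none` = the Python raise (IndexError / unpacking None), outside Pre_.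

def matLoop (patches : List (Option (Int × Int × Int))) : Nat → Int → List (Int × Int) → Option (List (Int × Int))
  | 0, v, acc => if v = 0 then some acc else none
  | fuel + 1, v, acc =>
    if v = 0 then some acc
    else
      match PySem.List.pyGet? patches v with
      | some (some pv) => matLoop patches fuel pv.1 (acc ++ [(pv.2.1, pv.2.2)])
      | _ => none

-- arr = list(initial_array); for pos, val in reversed(chain): arr[pos] = val
def applyLoop : List Int → List (Int × Int) → Option (List Int)
  | arr, [] => some arr
  | arr, pv :: rest =>
    match PySem.List.pySet? arr pv.1 pv.2 with
    | some arr' => applyLoop arr' rest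
    | none => none

def materialize (ia : List Int) (patches : List (Option (Int × Int × Int))) (version : Int) : Option (List Int) :=
  (matLoop patches patches.length version []).bind (fun chain => applyLoop ia chain.reverse)

def specLoopB (ia : List Int) (result : List (String × Int)) : List (String × Int × Int × Int) → List (Option (Int × Int × Int)) → Int → Bool
  | [], _, _ => true
  | op :: ops, patches, idx =>
    if idx ≥ (result.length : Int) then false
    else if op.1 = "update" then
      if op.2.1 ≥ (patches.length : Int) then false
      else
        match PySem.List.pyGet? result idx with
        | none => false
        | some tv =>
          if tv.1 ≠ "new_version" then false
          else specLoopB ia result ops (patches ++ [some (op.2.1, op.2.2.1, op.2.2.2)]) (idx + 1)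
    else if op.1 = "query" then
      if op.2.1 ≥ (patches.length : Int) then false
      else
        match materialize ia patches op.2.1 with
        | none => false
        | some arr =>
          let expected := (PySem.List.slice arr (some op.2.2.1) (some (op.2.2.2 + 1))).sum
          match PySem.List.pyGet? result idx with
          | none => false
          | some ta =>
            if ta.1 ≠ "answer" ∨ ta.2 ≠ expected then false
            else specLoopB ia result ops patches (idx + 1)
    else specLoopB ia result ops patches (idx + 1)

def SPEC_alt (initial_array : List Int) (operations : List (String × Int × Int × Int)) (result : List (String × Int)) : Bool :=
  specLoopB initial_array result operations [none] 0

-- ===== PRECONDITION & SPEC =====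
-- Pre_ excludes (a) inputs where A raises IndexError (an executed update whose position is
-- outside [-n, n), or a version index below -len(versions)); and (b) inputs addressing a
-- version by a NEGATIVE index, where A's resolution via Python's negative-index wraparound
-- is an accident B's journal of version ids does not reproduce (B raises or diverges there).
-- Past an op at which a length/version/tag test already forces A's early `return False`,
-- preB stops constraining; it is slightly conservative after a query whose answer mismatches
-- (tag right, value wrong), so it also excludes some inputs on which A returns False (see cites).

def preB (n : Int) : Nat → List (String × Int × Int × Int) → List (String × Int) → Bool
  | _, [], _ => true
  | _, _ :: _, [] => true
  | u, op :: ops, re :: res =>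
    if op.1 = "update" then
      if op.2.1 ≥ (1 + u : Int) then true
      else if 0 ≤ op.2.1 ∧ -n ≤ op.2.2.1 ∧ op.2.2.1 < n then
        (if re.1 ≠ "new_version" then true else preB n (u + 1) ops res)
      else false
    else if op.1 = "query" then
      if op.2.1 ≥ (1 + u : Int) then true
      else if 0 ≤ op.2.1 then
        (if re.1 ≠ "answer" then true else preB n u ops res)
      else false
    else preB n u ops res

def Pre_SPEC (initial_array : List Int) (operations : List (String × Int × Int × Int)) (result : List (String × Int)) : Prop :=
  preB (initial_array.length : Int) 0 operations result = true

instance (initial_array : List Int) (operations : List (String × Int × Int × Int)) (result : List (String × Int)) : Decidable (Pre_SPEC initial_array operations result) := by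
  unfold Pre_SPEC; infer_instance

def pvWitness_SPEC : List Int × (List (String × Int × Int × Int)) × (List (String × Int)) :=
  ([1, 2], [("update", 0, 1, 5), ("query", 1, 0, 1)], [("new_version", 1), ("answer", 6)])

def Spec_SPEC (initial_array : List Int) (operations : List (String × Int × Int × Int)) (result : List (String × Int)) (out : Bool) : Prop := out = SPEC_alt initial_array operations result
instance (initial_array : List Int) (operations : List (String × Int × Int × Int)) (result : List (String × Int)) (out : Bool) : Decidable (Spec_SPEC initial_array operations result out) := by unfold Spec_SPEC; infer_instance

-- ===== CLAIM (what is proved, stated in full; the proofs are below) =====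
def Claim_equal_SPEC : Prop := ∀ (initial_array : List Int) (operations : List (String × Int × Int × Int)) (result : List (String × Int)), Dom_SPEC initial_array operations result → Pre_SPEC initial_array operations result → Spec_SPEC initial_array operations result (SPEC initial_array operations result)

-- ===== LEMMAS AND PROOFS =====

-- well-formed journal: every patch's parent index is a smaller nonnegative index
def WFp (patches : List (Option (Int × Int × Int))) : Prop :=
  ∀ j : Nat, 1 ≤ j → j < patches.length →
    ∃ pv : Int × Int × Int, patches[j]? = some (some pv) ∧ 0 ≤ pv.1 ∧ pv.1 < (j : Int)

theorem pyGet?_append_left {α : Type} (xs ys : List α) (i : Int) (h0 : 0 ≤ i) (h1 : i < (xs.length : Int)) :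
    PySem.List.pyGet? (xs ++ ys) i = PySem.List.pyGet? xs i := by
  rw [PySem.List.pyGet?_of_nonneg _ h0, PySem.List.pyGet?_of_nonneg _ h0,
    List.getElem?_append_left (by omega)]

theorem pySet?_some_length {α : Type} (xs : List α) (i : Int) (v : α) (ys : List α)
    (h : PySem.List.pySet? xs i v = some ys) : ys.length = xs.length := by
  simp only [PySem.List.pySet?] at h
  cases hk : PySem.List.pyIdx? xs.length i with
  | none => rw [hk] at h; simp at h
  | some k =>
    rw [hk] at h
    simp only [Option.map_some, Option.some.injEq] at h
    rw [← h, List.length_set]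

theorem matLoop_append (patches : List (Option (Int × Int × Int))) (q : Option (Int × Int × Int))
    (hWF : WFp patches) :
    ∀ (fuel : Nat) (v : Int) (acc : List (Int × Int)), 0 ≤ v → v < (patches.length : Int) →
      matLoop (patches ++ [q]) fuel v acc = matLoop patches fuel v acc := by
  intro fuel
  induction fuel with
  | zero => intro v acc _ _; rfl
  | succ fuel ih =>
    intro v acc h0 h1
    rw [matLoop, matLoop]
    by_cases hv : v = 0
    · rw [if_pos hv, if_pos hv]
    · rw [if_neg hv, if_neg hv, pyGet?_append_left patches [q] v h0 h1]
      have hj : 1 ≤ v.toNat ∧ v.toNat < patches.length := by omega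
      obtain ⟨pv, hpv, hb0, hb1⟩ := hWF v.toNat hj.1 hj.2
      rw [PySem.List.pyGet?_of_nonneg _ h0, hpv]
      exact ih pv.1 (acc ++ [(pv.2.1, pv.2.2)]) hb0 (by omega)

theorem applyLoop_append (xs ys : List (Int × Int)) :
    ∀ arr : List Int, applyLoop arr (xs ++ ys) = (applyLoop arr xs).bind (fun a => applyLoop a ys) := by
  induction xs with
  | nil => intro arr; rfl
  | cons pv rest ih =>
    intro arr
    rw [List.cons_append, applyLoop, applyLoop]
    cases PySem.List.pySet? arr pv.1 pv.2 with
    | none => rfl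
    | some arr' => exact ih arr'

-- the journal denotes exactly A's version arrays
def Denotes (ia : List Int) (patches : List (Option (Int × Int × Int))) (versions : List (List Int)) : Prop :=
  ∀ v : Nat, v < versions.length → ∀ fuel : Nat, v ≤ fuel → ∀ acc : List (Int × Int),
    ∃ c, matLoop patches fuel (v : Int) acc = some (acc ++ c) ∧
         applyLoop ia c.reverse = some (versions.getD v [])

theorem denotes_append (ia : List Int) (patches : List (Option (Int × Int × Int)))
    (versions : List (List Int)) (hlen : patches.length = versions.length)
    (hWF : WFp patches) (hden : Denotes ia patches versions)
    (ver pos val : Int) (hver0 : 0 ≤ ver) (hver1 : ver < (versions.length : Int))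
    (arr new_arr : List Int)
    (harr : PySem.List.pyGet? versions ver = some arr)
    (hset : PySem.List.pySet? arr pos val = some new_arr) :
    Denotes ia (patches ++ [some (ver, pos, val)]) (versions ++ [new_arr]) := by
  intro v hv fuel hfuel acc
  rw [List.length_append, List.length_cons, List.length_nil] at hv
  by_cases hcase : v < versions.length
  · obtain ⟨c, hc1, hc2⟩ := hden v hcase fuel hfuel acc
    refine ⟨c, ?_, ?_⟩
    · rw [matLoop_append patches _ hWF fuel (v : Int) acc (by omega) (by omega), hc1]
    · rw [List.getD_eq_getElem?_getD, List.getElem?_append_left hcase,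
        ← List.getD_eq_getElem?_getD]
      exact hc2
  · have hveq : v = versions.length := by omega
    subst hveq
    have hfuel1 : 1 ≤ fuel := by omega
    obtain ⟨f, rfl⟩ : ∃ f, fuel = f + 1 := ⟨fuel - 1, by omega⟩
    rw [matLoop, if_neg (by omega : ¬ ((versions.length : Int) = 0))]
    have hget : PySem.List.pyGet? (patches ++ [some (ver, pos, val)]) ((versions.length : Nat) : Int)
        = some (some (ver, pos, val)) := by
      rw [← hlen]
      exact PySem.List.pyGet?_append_length patches [] (some (ver, pos, val))
    rw [hget]
    dsimp only
    have hrec : matLoop (patches ++ [some (ver, pos, val)]) f ver (acc ++ [(pos, val)])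
        = matLoop patches f ver (acc ++ [(pos, val)]) :=
      matLoop_append patches _ hWF f ver _ hver0 (by omega)
    obtain ⟨c, hc1, hc2⟩ := hden ver.toNat (by omega) f (by omega) (acc ++ [(pos, val)])
    rw [show ((ver.toNat : Nat) : Int) = ver by omega] at hc1
    refine ⟨(pos, val) :: c, ?_, ?_⟩
    · rw [hrec, hc1, List.append_assoc]
      rfl
    · rw [List.reverse_cons, applyLoop_append, hc2]
      have harr' : versions.getD ver.toNat [] = arr := by
        rw [PySem.List.pyGet?_of_nonneg _ hver0] at harr
        rw [List.getD_eq_getElem?_getD, harr]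
        rfl
      rw [harr']
      show applyLoop arr [(pos, val)] = _
      have hone : applyLoop arr [(pos, val)] = some new_arr := by
        simp [applyLoop, hset]
      rw [hone, List.getD_eq_getElem?_getD, List.getElem?_append_right (le_refl _)]
      simp

theorem wfp_append (patches : List (Option (Int × Int × Int))) (hWF : WFp patches)
    (ver pos val : Int) (hver0 : 0 ≤ ver) (hver1 : ver < (patches.length : Int)) :
    WFp (patches ++ [some (ver, pos, val)]) := by
  intro j hj1 hj2
  rw [List.length_append, List.length_cons, List.length_nil] at hj2
  by_cases hcase : j < patches.length
  · obtain ⟨pv, hpv, hb0, hb1⟩ := hWF j hj1 hcase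
    exact ⟨pv, by rw [List.getElem?_append_left hcase]; exact hpv, hb0, hb1⟩
  · have hjeq : j = patches.length := by omega
    subst hjeq
    refine ⟨(ver, pos, val), ?_, hver0, hver1⟩
    rw [List.getElem?_append_right (le_refl _)]
    simp

theorem loop_eq (ia : List Int) (n : Nat) (result : List (String × Int)) :
    ∀ (ops : List (String × Int × Int × Int)) (versions : List (List Int))
      (patches : List (Option (Int × Int × Int))) (idx : Int) (u : Nat),
      (∀ arr ∈ versions, arr.length = n) →
      versions.length = 1 + u →
      patches.length = versions.length →
      WFp patches →
      Denotes ia patches versions →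
      0 ≤ idx →
      preB (n : Int) u ops (result.drop idx.toNat) = true →
      specLoopA result ops versions idx = specLoopB ia result ops patches idx := by
  intro ops
  induction ops with
  | nil => intro versions patches idx u _ _ _ _ _ _ _; rfl
  | cons op ops ih =>
    intro versions patches idx u hmem hvlen hplen hWF hden hidx hpre
    obtain ⟨tag, ver, pos, val⟩ := op
    rw [specLoopA, specLoopB, hplen]
    by_cases hend : idx ≥ (result.length : Int)
    · rw [if_pos hend, if_pos hend]
    · rw [if_neg hend, if_neg hend]
      have hlt : idx.toNat < result.length := by omega
      obtain ⟨re, res', hdrop⟩ : ∃ re res', result.drop idx.toNat = re :: res' := by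
        cases hd : result.drop idx.toNat with
        | nil => exact absurd (List.drop_eq_nil_iff.mp hd) (by omega)
        | cons a b => exact ⟨a, b, rfl⟩
      have hres : PySem.List.pyGet? result idx = some re := by
        rw [PySem.List.pyGet?_of_nonneg result hidx, ← List.head?_drop, hdrop]; rfl
      have hdropsucc : result.drop (idx + 1).toNat = res' := by
        have h1 : (idx + 1).toNat = idx.toNat + 1 := by omega
        have h2 := congrArg List.tail hdrop
        rw [List.tail_drop] at h2
        rw [h1, h2]; rfl
      rw [hdrop] at hpre
      rw [preB] at hpre
      by_cases htag : tag = "update"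
      · simp only at hpre ⊢
        rw [if_pos htag] at hpre ⊢
        rw [if_pos htag]
        by_cases hver : ver ≥ ((versions.length : Nat) : Int)
        · rw [if_pos hver, if_pos hver]
        · rw [if_neg hver, if_neg hver]
          rw [if_neg (by rw [hvlen] at hver; push_cast at hver ⊢; omega : ¬(ver ≥ (1 + u : Int)))] at hpre
          have hbounds : 0 ≤ ver ∧ -(n : Int) ≤ pos ∧ pos < (n : Int) := by
            by_contra hb
            rw [if_neg hb] at hpre
            exact Bool.false_ne_true hpre
          rw [if_pos hbounds] at hpre
          obtain ⟨hb1, hb2, hb3⟩ := hbounds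
          have hverlt : ver < (versions.length : Int) := by omega
          obtain ⟨arr, harr⟩ : ∃ arr, PySem.List.pyGet? versions ver = some arr :=
            ⟨_, PySem.List.pyGet?_eq_some_getElem versions hb1 hverlt⟩
          have harrlen : arr.length = n := hmem arr (PySem.List.mem_of_pyGet?_eq_some _ harr)
          obtain ⟨new_arr, hset⟩ : ∃ s, PySem.List.pySet? arr pos val = some s := by
            unfold PySem.List.pySet? PySem.List.pyIdx?
            rcases Int.lt_or_le pos 0 with hp | hp
            · rw [if_neg (by omega : ¬ (0 ≤ pos)),
                if_pos (show -(arr.length : Int) ≤ pos by omega)]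
              exact ⟨_, rfl⟩
            · rw [if_pos hp, if_pos (show pos < (arr.length : Int) by omega)]
              exact ⟨_, rfl⟩
          rw [harr]
          dsimp only
          rw [hset, hres]
          dsimp only
          by_cases htv : re.1 ≠ "new_version"
          · rw [if_pos htv, if_pos htv]
          · rw [if_neg htv, if_neg htv]
            rw [if_neg (by simpa using htv)] at hpre
            exact ih (versions ++ [new_arr]) (patches ++ [some (ver, pos, val)]) (idx + 1) (u + 1)
              (by intro a ha
                  rcases List.mem_append.mp ha with h | h
                  · exact hmem a h
                  · simp at h
                    rw [h, pySet?_some_length arr pos val new_arr hset]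
                    exact harrlen)
              (by rw [List.length_append, hvlen]; simp; omega)
              (by simp [hplen])
              (wfp_append patches hWF ver pos val hb1 (by omega))
              (denotes_append ia patches versions hplen hWF hden ver pos val hb1 hverlt arr new_arr harr hset)
              (by omega)
              (by rw [hdropsucc]; exact hpre)
      · rw [if_neg htag] at hpre ⊢
        rw [if_neg htag]
        by_cases htq : tag = "query"
        · rw [if_pos htq] at hpre ⊢
          rw [if_pos htq]
          by_cases hver : ver ≥ ((versions.length : Nat) : Int)
          · rw [if_pos hver, if_pos hver]
          · rw [if_neg hver, if_neg hver]
            rw [if_neg (by rw [hvlen] at hver; push_cast at hver ⊢; omega : ¬(ver ≥ (1 + u : Int)))] at hpre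
            have hb1 : 0 ≤ ver := by
              by_contra hb
              rw [if_neg hb] at hpre
              exact Bool.false_ne_true hpre
            rw [if_pos hb1] at hpre
            have hverlt : ver < (versions.length : Int) := by omega
            obtain ⟨arr, harr⟩ : ∃ arr, PySem.List.pyGet? versions ver = some arr :=
              ⟨_, PySem.List.pyGet?_eq_some_getElem versions hb1 hverlt⟩
            have hmat : materialize ia patches ver = some arr := by
              obtain ⟨c, hc1, hc2⟩ := hden ver.toNat (by omega) patches.length
                (by omega) []
              rw [show ((ver.toNat : Nat) : Int) = ver by omega] at hc1
              rw [materialize, hc1]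
              simp only [List.nil_append, Option.bind_some]
              rw [hc2]
              congr 1
              rw [PySem.List.pyGet?_of_nonneg _ hb1] at harr
              rw [List.getD_eq_getElem?_getD, harr]
              rfl
            rw [harr, hmat]
            dsimp only
            rw [hres]
            dsimp only
            by_cases hcond : re.1 ≠ "answer" ∨ re.2 ≠ (PySem.List.slice arr (some pos) (some (val + 1))).sum
            · rw [if_pos hcond, if_pos hcond]
            · rw [if_neg hcond, if_neg hcond]
              have hra : ¬ re.1 ≠ "answer" := fun h => hcond (Or.inl h)
              rw [if_neg (by simpa using hra)] at hpre
              exact ih versions patches (idx + 1) u hmem hvlen hplen hWF hden (by omega)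
                (by rw [hdropsucc]; exact hpre)
        · rw [if_neg htq] at hpre ⊢
          rw [if_neg htq]
          exact ih versions patches (idx + 1) u hmem hvlen hplen hWF hden (by omega)
            (by rw [hdropsucc]; exact hpre)

-- ===== VERDICT (by name: the statement is the Claim_ definition above) =====
theorem SPEC_spec : Claim_equal_SPEC := by
  intro ia ops res _ hpre
  unfold Spec_SPEC SPEC SPEC_alt
  refine loop_eq ia ia.length res ops [ia] [none] 0 0 (by simp) (by simp) (by simp) ?_ ?_ (by omega)
    (by simpa using hpre)
  · intro j hj1 hj2
    simp at hj2
    omega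
  · intro v hv fuel hfuel acc
    have hv0 : v = 0 := by simpa using hv
    subst hv0
    refine ⟨[], ?_, rfl⟩
    cases fuel <;> simp [matLoop]
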